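-- pv_equiv track=rewrite | github.com/AidenOXis/Progetto-Artificiale | ProgettoV2/new.py | collapse_suspicions
-- ===== SOURCE A (Python) =====
-- from collections import defaultdict, Counter
--
-- def collapse_suspicions(entries):
--     """
--     entries: list of (node, reason)
--     returns: dict {node: Counter of reasons}
--     """
--     grouped = defaultdict(list)
--     for node, reason in entries:
--         grouped[node].append(reason)
--
--     collapsed = {}
--     for node, reasons in grouped.items():
--         reason_counts = Counter(reasons)
--         collapsed[node] = reason_counts
--     return collapsed
-- ===== SOURCE B (Python) =====
-- from collections import Counter
--
-- def collapse_suspicions(entries):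
--     out = {}
--     for node in dict.fromkeys(n for n, _ in entries):
--         reasons = [r for n, r in entries if n == node]
--         out[node] = Counter({r: reasons.count(r) for r in dict.fromkeys(reasons)})
--     return out
-- ===== Notes on version B (the rewrite author's own statement) =====
-- stated objective: alternative
-- what changed: B keeps no grouping dictionary at all: it dedups the node names (dict.fromkeys), then for each node rescans the whole entry list and counts each distinct reason with list.count, instead of A's single-pass accumulation into a defaultdict of lists followed by Counter().
import Mathlib
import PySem

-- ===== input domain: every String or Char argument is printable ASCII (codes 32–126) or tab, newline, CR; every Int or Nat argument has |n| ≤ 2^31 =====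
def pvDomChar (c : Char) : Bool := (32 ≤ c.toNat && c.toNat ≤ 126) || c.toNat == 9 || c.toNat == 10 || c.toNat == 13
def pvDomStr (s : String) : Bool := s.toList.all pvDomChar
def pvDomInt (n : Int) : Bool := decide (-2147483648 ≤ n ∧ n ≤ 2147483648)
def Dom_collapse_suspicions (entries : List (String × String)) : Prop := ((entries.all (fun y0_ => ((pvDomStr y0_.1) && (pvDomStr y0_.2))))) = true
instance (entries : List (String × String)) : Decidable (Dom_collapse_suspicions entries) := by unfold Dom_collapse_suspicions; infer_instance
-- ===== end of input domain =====

-- B drops A's grouping dict entirely: it dedups the nodes, then for each node rescans the list and counts each distinct reason with list.count (alternative; slower on large inputs but shorter and stateless).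

-- ===== PORT A =====
-- grouped = defaultdict(list); for node, reason in entries: grouped[node].append(reason)
-- collapsed = {}; for node, reasons in grouped.items(): collapsed[node] = Counter(reasons); return collapsed
def collapse_suspicions (entries : List (String × String)) : List (String × List (String × Int)) :=
  let grouped : PySem.Dict String (List String) :=
    entries.foldl (fun d p => d.modify p.1 [] (· ++ [p.2])) PySem.Dict.empty
  let collapsed : PySem.Dict String (PySem.Dict String Int) :=
    grouped.items.foldl (fun c p => c.insert p.1 (PySem.Dict.counter p.2)) PySem.Dict.empty
  collapsed.items.map (fun p => (p.1, p.2.items))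

-- ===== PORT B =====
-- for node in dict.fromkeys(nodes): reasons = [r for n, r in entries if n == node];
--   out[node] = Counter({r: reasons.count(r) for r in dict.fromkeys(reasons)})
def collapse_suspicions_alt (entries : List (String × String)) : List (String × List (String × Int)) :=
  (PySem.List.dedup (entries.map (·.1))).map (fun node =>
    let reasons := (entries.filter (fun p => p.1 == node)).map (·.2)
    (node, (PySem.List.dedup reasons).map (fun r => (r, (reasons.count r : Int)))))

-- ===== PRECONDITION & SPEC =====
def Spec_collapse_suspicions (entries : List (String × String)) (out : List (String × List (String × Int))) : Prop := out = collapse_suspicions_alt entries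
instance (entries : List (String × String)) (out : List (String × List (String × Int))) : Decidable (Spec_collapse_suspicions entries out) := by unfold Spec_collapse_suspicions; infer_instance

-- ===== CLAIM =====
def Claim_equal_collapse_suspicions : Prop := ∀ (entries : List (String × String)), Dom_collapse_suspicions entries → Spec_collapse_suspicions entries (collapse_suspicions entries)

-- ===== LEMMAS AND PROOFS =====

theorem collapse_suspicions_spec_aux (entries : List (String × String)) :
    collapse_suspicions entries = collapse_suspicions_alt entries := by
  unfold collapse_suspicions collapse_suspicions_alt
  dsimp only
  set gstep : PySem.Dict String (List String) → String × String → PySem.Dict String (List String) :=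
    fun d p => d.modify p.1 [] (· ++ [p.2]) with hgstep
  have hgnodup : (entries.foldl gstep PySem.Dict.empty).keys.Nodup := by
    exact PySem.Dict.nodup_keys_foldl_modify_key entries Prod.fst [] _ _ (by simp)
  have hkeys : (entries.foldl gstep PySem.Dict.empty).keys = PySem.Set.ofList (entries.map Prod.fst) := by
    rw [hgstep, PySem.Dict.keys_foldl_modify_key (key := Prod.fst)]
    rfl
  have hfresh : ((entries.foldl gstep PySem.Dict.empty).items.foldl
        (fun c p => c.insert p.1 (PySem.Dict.counter p.2)) (PySem.Dict.empty : PySem.Dict String (PySem.Dict String Int))).items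
      = ([] : List (String × PySem.Dict String Int)) ++ (entries.foldl gstep PySem.Dict.empty).items.map
          (fun p => (p.1, PySem.Dict.counter p.2)) := by
    apply PySem.Dict.items_foldl_insert_fresh (k := Prod.fst) (v := fun p => PySem.Dict.counter p.2)
    · intro a _; simp [PySem.Dict.contains_empty]
    · simpa [PySem.Dict.keys] using hgnodup
  rw [hfresh]
  rw [PySem.Dict.items_eq_map_keys (entries.foldl gstep PySem.Dict.empty) hgnodup []]
  rw [hkeys]
  simp only [List.nil_append, List.map_map, PySem.List.dedup_eq_ofList]
  apply List.map_congr_left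
  intro k _
  simp only [Function.comp]
  rw [hgstep, PySem.Dict.getD_foldl_modify_append, PySem.Dict.getD_empty, List.nil_append,
      PySem.Dict.items_counter]

-- ===== VERDICT =====
theorem collapse_suspicions_spec : Claim_equal_collapse_suspicions := by
  intro entries _
  unfold Spec_collapse_suspicions
  exact collapse_suspicions_spec_aux entries
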